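-- pv_equiv track=rewrite | github.com/sumanthumesh/hyrise_pmr | myscripts/critical_path.py | compute_all_paths
-- ===== SOURCE A (Python) =====
-- from typing import Dict, List, Tuple, Set
--
-- def compute_all_paths(vertices: Dict[int, int], edges: Dict[int, List[int]], root_id: int) -> List[Tuple[int, List[int]]]:
--     """
--     Find all paths from root to source nodes, calculate their walltimes, and return them sorted by walltime.
--     Returns: list of (total_walltime, path_as_list_of_vertex_ids)
--     """
--     # Build reverse edges for traversal from root backwards
--     reverse_edges: Dict[int, List[int]] = {}
--     for src in edges:
--         for dest in edges[src]:
--             if dest not in reverse_edges: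
--                 reverse_edges[dest] = []
--             reverse_edges[dest].append(src)
--
--     all_paths: List[List[int]] = []
--
--     def find_all_paths(node_id: int, current_path: List[int]):
--         """
--         DFS to find all paths from root backwards to source nodes.
--         """
--         current_path.append(node_id)
--
--         # Base case: if this node has no incoming edges, it's a source node
--         if node_id not in reverse_edges or len(reverse_edges[node_id]) == 0:
--             # Found a complete path from source to root
--             all_paths.append(current_path[:])  # Save a copy of the path
--         else:
--             # Recursive case: explore all parents
--             for parent_id in reverse_edges[node_id]:
--                 find_all_paths(parent_id, current_path)
--
--         current_path.pop()
--
--     # Find all paths starting from root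
--     find_all_paths(root_id, [])
--
--     # Calculate walltime for each path
--     paths_with_times: List[Tuple[int, List[int]]] = []
--
--     for path in all_paths:
--         path_walltime = sum(vertices[node_id] for node_id in path)
--         paths_with_times.append((path_walltime, path))
--
--     # Sort by walltime in descending order
--     paths_with_times.sort(reverse=True, key=lambda x: x[0])
--
--     return paths_with_times
-- ===== SOURCE B (Python) =====
-- from typing import Dict, List, Tuple
--
-- def compute_all_paths(vertices: Dict[int, int], edges: Dict[int, List[int]], root_id: int) -> List[Tuple[int, List[int]]]:
--     """
--     Find all paths from root to source nodes with their walltimes, sorted by walltime descending.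
--     Pure recursive decomposition: paths_from(node) returns the (walltime, path) pairs directly,
--     accumulating walltimes on the way back up instead of a separate summation pass.
--     """
--     reverse_edges: Dict[int, List[int]] = {}
--     for src in edges:
--         for dest in edges[src]:
--             reverse_edges.setdefault(dest, []).append(src)
--
--     def paths_from(node_id: int) -> List[Tuple[int, List[int]]]:
--         w = vertices[node_id]
--         parents = reverse_edges.get(node_id, [])
--         if not parents:
--             return [(w, [node_id])]
--         return [(w + pw, [node_id] + p) for par in parents for (pw, p) in paths_from(par)]
--
--     return sorted(paths_from(root_id), key=lambda t: t[0], reverse=True)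
-- ===== Notes on version B (the rewrite author's own statement) =====
-- stated objective: simpler
-- what changed: Replaces A's mutating backtracking DFS (shared current_path with append/pop, a global all_paths list, then a second pass summing each path's walltimes) by a pure recursion paths_from(node) that returns the (walltime, path) pairs directly, accumulating walltimes on the way back up in one traversal.
import Mathlib
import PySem

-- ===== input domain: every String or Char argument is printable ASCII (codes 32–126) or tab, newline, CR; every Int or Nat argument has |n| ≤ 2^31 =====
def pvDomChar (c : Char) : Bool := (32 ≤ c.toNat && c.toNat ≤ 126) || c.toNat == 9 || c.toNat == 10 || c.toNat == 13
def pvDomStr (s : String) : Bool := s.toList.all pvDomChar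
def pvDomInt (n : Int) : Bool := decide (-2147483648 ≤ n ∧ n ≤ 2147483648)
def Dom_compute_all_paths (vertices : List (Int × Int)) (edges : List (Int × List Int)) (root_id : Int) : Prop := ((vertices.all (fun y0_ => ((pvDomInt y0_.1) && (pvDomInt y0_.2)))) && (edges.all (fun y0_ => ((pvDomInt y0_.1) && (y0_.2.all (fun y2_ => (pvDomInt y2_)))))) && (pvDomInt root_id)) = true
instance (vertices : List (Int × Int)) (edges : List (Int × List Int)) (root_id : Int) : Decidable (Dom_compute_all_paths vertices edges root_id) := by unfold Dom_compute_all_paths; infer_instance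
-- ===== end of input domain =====

-- B replaces A's mutating backtracking DFS (global path list + a second walltime-summation pass)
-- by a pure recursion returning (walltime, path) pairs directly, accumulating walltimes on the
-- way back up (objective: simpler; same asymptotic cost).

-- Both Pythons build the reverse-edge dict with the same loop (A: if-not-in + append, B: setdefault
-- + append — the same dict operation); ported once.  `for src in edges` iterates the dict's keys.
def buildRev (edges : List (Int × List Int)) : PySem.Dict Int (List Int) :=
  (PySem.Dict.ofList edges).items.foldl
    (fun rev sd => sd.2.foldl (fun rev dest => PySem.Dict.modify rev dest [] (fun l => l ++ [sd.1])) rev)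
    PySem.Dict.empty

-- ===== PORT A =====
-- A's nested find_all_paths: mutation of current_path / all_paths rendered as the returned list of
-- completed paths (append + recurse + pop = recurse with path ++ [node]).  `node not in rev or
-- rev[node] == []` is `(rev.getD node []).isEmpty`.  fuel is a totality guard only: under
-- Pre_compute_all_paths the recursion depth is at most edges.length + 1, so it never runs out
-- (Python A hits RecursionError / diverges exactly where Pre_ is false).
def goA (rev : PySem.Dict Int (List Int)) : Nat → Int → List Int → List (List Int)
  | 0, _, _ => []
  | fuel+1, node, path =>
    let path' := path ++ [node]
    let ps := rev.getD node []
    if ps.isEmpty then [path']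
    else ps.foldl (fun acc par => acc ++ goA rev fuel par path') []

-- vertices[n]: Python raises KeyError on a missing key; Pre_compute_all_paths requires every
-- reachable node to be a key of vertices, so the getD default is never exercised inside Pre_.
def compute_all_paths (vertices : List (Int × Int)) (edges : List (Int × List Int)) (root_id : Int) : List (Int × List Int) :=
  let rev := buildRev edges
  let allPaths := goA rev (edges.length + 2) root_id []
  let vd := PySem.Dict.ofList vertices
  let withTimes := allPaths.foldl
    (fun acc p => acc ++ [(p.foldl (fun s n => s + vd.getD n 0) 0, p)]) ([] : List (Int × List Int))
  PySem.List.sorted withTimes (fun t => t.1) true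

-- ===== PORT B =====
-- B's paths_from: pure recursion returning (walltime, path) pairs; same fuel guard as A's port.
def goB (vd : PySem.Dict Int Int) (rev : PySem.Dict Int (List Int)) : Nat → Int → List (Int × List Int)
  | 0, _ => []
  | fuel+1, node =>
    let w := vd.getD node 0
    let ps := rev.getD node []
    if ps.isEmpty then [(w, [node])]
    else ps.flatMap (fun par => (goB vd rev fuel par).map (fun t => (w + t.1, node :: t.2)))

def compute_all_paths_alt (vertices : List (Int × Int)) (edges : List (Int × List Int)) (root_id : Int) : List (Int × List Int) :=
  let rev := buildRev edges
  let vd := PySem.Dict.ofList vertices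
  PySem.List.sorted (goB vd rev (edges.length + 2) root_id) (fun t => t.1) true

-- ===== PRECONDITION & SPEC =====
-- Pre_ helpers: set-of-nodes frontier stepping along the reverse edges.
def pvStep (edges : List (Int × List Int)) (f : List Int) : List Int :=
  PySem.List.dedup (f.flatMap (fun n => (buildRev edges).getD n []))

def pvIter (edges : List (Int × List Int)) : Nat → List Int → List Int
  | 0, f => f
  | k+1, f => pvIter edges k (pvStep edges f)

def pvReach (edges : List (Int × List Int)) (root : Int) : Nat → List Int
  | 0 => [root]
  | k+1 => PySem.List.dedup (pvReach edges root k ++ pvStep edges (pvReach edges root k))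

-- Pre_ = exactly the inputs on which Python A returns: (1) no walk of length edges.length + 1
-- leaves root in the reverse-edge graph (⟺ no cycle reachable from root, i.e. the DFS
-- terminates instead of raising RecursionError), and (2) every node reachable from root is a key
-- of vertices (else the walltime sum raises KeyError).
def Pre_compute_all_paths (vertices : List (Int × Int)) (edges : List (Int × List Int)) (root_id : Int) : Prop :=
  pvIter edges (edges.length + 1) [root_id] = [] ∧
  ∀ n ∈ pvReach edges root_id (edges.length + 1), (PySem.Dict.ofList vertices).contains n = true

instance (vertices : List (Int × Int)) (edges : List (Int × List Int)) (root_id : Int) : Decidable (Pre_compute_all_paths vertices edges root_id) := by unfold Pre_compute_all_paths; infer_instance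

def pvWitness_compute_all_paths : (List (Int × Int)) × (List (Int × List Int)) × Int :=
  ([(1, 5), (2, 3), (3, 2)], [(1, [2]), (2, [3])], 3)

def Spec_compute_all_paths (vertices : List (Int × Int)) (edges : List (Int × List Int)) (root_id : Int) (out : List (Int × List Int)) : Prop := out = compute_all_paths_alt vertices edges root_id
instance (vertices : List (Int × Int)) (edges : List (Int × List Int)) (root_id : Int) (out : List (Int × List Int)) : Decidable (Spec_compute_all_paths vertices edges root_id out) := by unfold Spec_compute_all_paths; infer_instance

-- ===== CLAIM (what is proved, stated in full; the proofs are below) =====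
def Claim_equal_compute_all_paths : Prop := ∀ (vertices : List (Int × Int)) (edges : List (Int × List Int)) (root_id : Int), Dom_compute_all_paths vertices edges root_id → Pre_compute_all_paths vertices edges root_id → Spec_compute_all_paths vertices edges root_id (compute_all_paths vertices edges root_id)

-- ===== LEMMAS AND PROOFS =====

-- A's DFS with accumulated prefix `path` is its DFS from the empty prefix, with `path` prepended.
theorem goA_prefix (rev : PySem.Dict Int (List Int)) :
    ∀ (fuel : Nat) (node : Int) (path : List Int),
      goA rev fuel node path = (goA rev fuel node []).map (fun p => path ++ p) := by
  intro fuel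
  induction fuel with
  | zero => intro node path; simp [goA]
  | succ fuel ih =>
    intro node path
    simp only [goA]
    by_cases h : (rev.getD node []).isEmpty
    · simp [h]
    · simp only [h, Bool.false_eq_true, if_false, PySem.List.foldl_append_eq_flatMap, List.nil_append,
        List.map_flatMap]
      refine List.flatMap_congr ?_
      intro par _
      rw [ih par (path ++ [node]), ih par [node]]
      simp [List.map_map, Function.comp_def, List.append_assoc]

-- B's recursion returns exactly A's paths paired with their walltime sums.
theorem goB_eq_goA (vd : PySem.Dict Int Int) (rev : PySem.Dict Int (List Int)) :
    ∀ (fuel : Nat) (node : Int),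
      goB vd rev fuel node
        = (goA rev fuel node []).map (fun p => (p.foldl (fun s n => s + vd.getD n 0) 0, p)) := by
  intro fuel
  induction fuel with
  | zero => intro node; simp [goA, goB]
  | succ fuel ih =>
    intro node
    simp only [goA, goB]
    by_cases h : (rev.getD node []).isEmpty
    · simp [h, PySem.List.foldl_add]
    · simp only [h, Bool.false_eq_true, if_false, PySem.List.foldl_append_eq_flatMap, List.nil_append,
        List.map_flatMap]
      refine List.flatMap_congr ?_
      intro par _
      rw [ih par, goA_prefix rev fuel par [node]]
      simp [List.map_map, Function.comp_def, PySem.List.foldl_add]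

-- ===== VERDICT (by name: the statement is the Claim_ definition above) =====
theorem compute_all_paths_spec : Claim_equal_compute_all_paths := by
  intro vertices edges root_id _ _
  unfold Spec_compute_all_paths compute_all_paths compute_all_paths_alt
  simp only [PySem.List.foldl_append_singleton_eq_map, List.nil_append]
  rw [goB_eq_goA]
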